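-- pv_equiv track=rewrite | github.com/eataix/algorithms | lintcode/958.palindrome-data-stream.py | getStream
-- ===== SOURCE A (Python) =====
-- def getStream(s):
--     oldChars = set()
--     result = [0] * len(s)
--
--     for i in range(len(s)):
--         ch = s[i]
--
--         if ch not in oldChars:
--             oldChars.add(ch)
--         else:
--             oldChars.remove(ch)
--
--         if len(oldChars) > 1:
--             result[i] = 0
--         else:
--             result[i] = 1
--     return result
-- ===== SOURCE B (Python) =====
-- def getStream(s):
--     # Offline difference-array algorithm: for each character, its count is odd exactly on the
--     # half-open intervals between consecutive occurrences [p0,p1), [p2,p3), ...; mark +1/-1 at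
--     # alternating occurrence positions, then one prefix-sum pass gives the number of odd
--     # characters at each prefix.
--     n = len(s)
--     delta = [0] * (n + 1)
--     for c in sorted(set(s)):
--         ps = [i for i in range(n) if s[i] == c]
--         for k in range(len(ps)):
--             delta[ps[k]] += 1 if k % 2 == 0 else -1
--     result = []
--     odd = 0
--     for i in range(n):
--         odd += delta[i]
--         result.append(1 if odd <= 1 else 0)
--     return result
-- ===== Notes on version B (the rewrite author's own statement) =====
-- stated objective: alternative
-- what changed: Replaces A's online pass that maintains a parity set per prefix by an offline staged algorithm: group the occurrence positions of each character, write +1/-1 marks into a difference array at its alternating occurrences (character parity is odd exactly between consecutive occurrences), then a single prefix-sum pass over the difference array yields the number of odd-count characters at every prefix and hence the flag.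
import Mathlib
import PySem

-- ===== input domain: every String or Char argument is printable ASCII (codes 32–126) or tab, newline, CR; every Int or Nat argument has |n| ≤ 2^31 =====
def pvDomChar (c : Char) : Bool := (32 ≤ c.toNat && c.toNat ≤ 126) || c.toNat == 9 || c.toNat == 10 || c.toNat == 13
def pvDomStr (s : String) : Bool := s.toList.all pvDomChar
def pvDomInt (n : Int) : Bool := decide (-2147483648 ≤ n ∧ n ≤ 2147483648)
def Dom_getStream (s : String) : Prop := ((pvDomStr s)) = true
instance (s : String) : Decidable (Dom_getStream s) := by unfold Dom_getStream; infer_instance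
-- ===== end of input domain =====

-- B replaces A's online parity-set pass by an offline staged algorithm (positions grouped per
-- character, ±1 marks in a difference array, one prefix-sum pass); objective: alternative.

-- ===== PORT A =====
def getStreamStepA (s : String) (st : PySem.Set Char × List Int) (i : Int) :
    PySem.Set Char × List Int :=
  match PySem.Str.pyGet? s i with
  | none => st  -- unreachable: i ranges over range(len(s)), always in range
  | some ch =>
    let oldChars :=
      if ¬ (PySem.Set.contains st.1 ch = true) then PySem.Set.add st.1 ch
      else (PySem.Set.remove? st.1 ch).getD st.1  -- ch is in the set here, so remove? succeeds
    (oldChars, PySem.List.pySetD st.2 i (if PySem.Set.len oldChars > 1 then (0 : Int) else 1))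

def getStream (s : String) : List Int :=
  ((PySem.List.pyRange 0 (PySem.Str.len s) 1).foldl (getStreamStepA s)
    (PySem.Set.empty, List.replicate s.toList.length (0 : Int))).2

-- ===== PORT B =====
-- delta[p] += v   (p is an index produced by the loops, always in range, so pyGetD/pySetD are exact)
def addAt (d : List Int) (p v : Int) : List Int :=
  PySem.List.pySetD d p (PySem.List.pyGetD d p 0 + v)

-- ps = [i for i in range(n) if s[i] == c]   (i in range, so pyGet? always returns)
def psB (s : String) (c : Char) : List Int :=
  (PySem.List.pyRange 0 (PySem.Str.len s) 1).filter (fun i => PySem.Str.pyGet? s i == some c)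

-- the difference array after the marking loop over sorted(set(s))
def deltaB (s : String) : List Int :=
  (PySem.List.sorted (PySem.Set.ofList s.toList) (fun x => x)).foldl
    (fun d c =>
      (PySem.List.pyRange 0 ((psB s c).length : Int) 1).foldl
        (fun d k =>
          addAt d (PySem.List.pyGetD (psB s c) k 0)  -- ps[k]: k in range(len(ps))
            (if PySem.Int.mod k 2 == 0 then (1 : Int) else -1))
        d)
    (List.replicate (s.toList.length + 1) (0 : Int))  -- [0] * (n + 1)

def getStream_alt (s : String) : List Int :=
  ((PySem.List.pyRange 0 (PySem.Str.len s) 1).foldl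
      (fun st i =>
        let odd := st.1 + PySem.List.pyGetD (deltaB s) i 0  -- delta[i]: i < len(delta)
        (odd, st.2 ++ [if odd ≤ 1 then (1 : Int) else 0]))
      ((0 : Int), ([] : List Int))).2

-- ===== PRECONDITION & SPEC =====
def Spec_getStream (s : String) (out : List Int) : Prop := out = getStream_alt s
instance (s : String) (out : List Int) : Decidable (Spec_getStream s out) := by unfold Spec_getStream; infer_instance

-- ===== CLAIM (what is proved, stated in full; the proofs are below) =====
def Claim_equal_getStream : Prop := ∀ (s : String), Dom_getStream s → Spec_getStream s (getStream s)

-- ===== LEMMAS AND PROOFS =====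

-- ±1 written at a position whose character count so far is even/odd
def sgnP (t : List Char) (c : Char) : Int := if t.count c % 2 = 0 then 1 else -1

-- number of characters of u whose count in t is odd
def oddU (u t : List Char) : Int := ((u.filter (fun c => t.count c % 2 == 1)).length : Int)

-- occurrence positions of c in l
def posNat (l : List Char) (c : Char) : List Nat :=
  (List.range l.length).filter (fun i => l[i]? == some c)

-- B's per-character marking loop, re-indexed over enumerate of the Nat positions
def applyChar (l : List Char) (d : List Int) (c : Char) : List Int :=
  (PySem.List.enumerate (posNat l c) 0).foldl
    (fun d kp => addAt d ((kp.2 : Int)) (if PySem.Int.mod kp.1 2 == 0 then (1 : Int) else -1)) d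

-- A's loop, restated as structural recursion on the remaining characters
def emitA (S : PySem.Set Char) : List Char → List Int
  | [] => []
  | c :: t =>
    let S' :=
      if ¬ (PySem.Set.contains S c = true) then PySem.Set.add S c
      else (PySem.Set.remove? S c).getD S
    (if PySem.Set.len S' > 1 then (0 : Int) else 1) :: emitA S' t

theorem toggle_nodup {S : PySem.Set Char} (hS : S.Nodup) (c : Char) :
    (if ¬ (PySem.Set.contains S c = true) then PySem.Set.add S c
     else (PySem.Set.remove? S c).getD S).Nodup := by
  by_cases h : PySem.Set.contains S c = true
  · rw [if_neg (not_not_intro h), PySem.Set.remove?_of_mem ((PySem.Set.contains_iff S c).mp h)]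
    exact PySem.Set.nodup_discard S c hS
  · rw [if_pos h]
    exact PySem.Set.nodup_add S c hS

theorem mem_toggle (S : PySem.Set Char) (c x : Char) :
    (x ∈ (if ¬ (PySem.Set.contains S c = true) then PySem.Set.add S c
          else (PySem.Set.remove? S c).getD S)) ↔ (if x = c then ¬ (x ∈ S) else x ∈ S) := by
  by_cases h : PySem.Set.contains S c = true
  · have hc : c ∈ S := (PySem.Set.contains_iff S c).mp h
    rw [if_neg (not_not_intro h), PySem.Set.remove?_of_mem hc, Option.getD_some,
      PySem.Set.mem_discard]
    by_cases hx : x = c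
    · subst hx; simp [hc]
    · simp [hx]
  · have hc : ¬ (c ∈ S) := fun hm => h ((PySem.Set.contains_iff S c).mpr hm)
    rw [if_pos h, PySem.Set.mem_add]
    by_cases hx : x = c
    · subst hx; simp [hc]
    · simp [hx]

theorem count_append_singleton (t : List Char) (c x : Char) :
    (t ++ [c]).count x = t.count x + if x = c then 1 else 0 := by
  rw [List.count_append, List.count_singleton]
  by_cases h : x = c
  · simp [h]
  · have h' : ¬ (c = x) := fun hh => h hh.symm
    simp [h, h']

theorem set_len_eq_oddU {u : List Char} (hu : u.Nodup) {S : PySem.Set Char} (hS : S.Nodup)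
    {t : List Char} (hmem : ∀ c, c ∈ S ↔ t.count c % 2 = 1)
    (hsub : ∀ c, t.count c % 2 = 1 → c ∈ u) : PySem.Set.len S = oddU u t := by
  have hperm : S.Perm (u.filter (fun c => t.count c % 2 == 1)) := by
    refine (List.perm_ext_iff_of_nodup hS (hu.filter _)).mpr ?_
    intro a
    rw [List.mem_filter, hmem a]
    constructor
    · intro h; exact ⟨hsub a h, by simpa using h⟩
    · intro h; simpa using h.2
  have hlen : S.length = (u.filter (fun c => t.count c % 2 == 1)).length := hperm.length_eq
  show (S.length : Int) = oddU u t
  rw [hlen]; rfl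

theorem emitA_spec (u : List Char) (hu : u.Nodup) :
    ∀ (t pre : List Char) (S : PySem.Set Char), S.Nodup →
      (∀ c, c ∈ S ↔ pre.count c % 2 = 1) → (∀ c, c ∈ pre ++ t → c ∈ u) →
      emitA S t = (List.range t.length).map
        (fun i => if oddU u (pre ++ t.take (i + 1)) ≤ 1 then (1 : Int) else 0) := by
  intro t
  induction t with
  | nil => intro pre S _ _ _; rfl
  | cons c t' ih =>
      intro pre S hS hmem hsub
      rw [emitA]
      set S' := if ¬ (PySem.Set.contains S c = true) then PySem.Set.add S c
        else (PySem.Set.remove? S c).getD S with hS'def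
      have hS' : S'.Nodup := toggle_nodup hS c
      have hmem' : ∀ x, x ∈ S' ↔ (pre ++ [c]).count x % 2 = 1 := by
        intro x
        rw [hS'def, mem_toggle, count_append_singleton]
        by_cases hx : x = c
        · subst hx; rw [if_pos rfl, if_pos rfl, hmem x]; omega
        · rw [if_neg hx, if_neg hx, hmem x]; omega
      have hsub' : ∀ x, x ∈ (pre ++ [c]) ++ t' → x ∈ u := by
        intro x hx
        exact hsub x (by simpa [List.append_assoc] using hx)
      have hsubp : ∀ x, (pre ++ [c]).count x % 2 = 1 → x ∈ u := by
        intro x hx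
        have hmemx : x ∈ pre ++ [c] := List.count_pos_iff.mp (by omega)
        refine hsub x ?_
        rcases List.mem_append.mp hmemx with hm | hm
        · exact List.mem_append.mpr (Or.inl hm)
        · simp only [List.mem_singleton] at hm
          simp [hm]
      have hlen : PySem.Set.len S' = oddU u (pre ++ [c]) :=
        set_len_eq_oddU hu hS' hmem' hsubp
      rw [ih (pre ++ [c]) S' hS' hmem' hsub']
      rw [List.length_cons, List.range_succ_eq_map, List.map_cons, List.map_map]
      congr 1
      · rw [hlen]
        simp only [List.take_succ_cons, List.take_zero]
        by_cases h : oddU u (pre ++ [c]) ≤ 1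
        · rw [if_neg (by omega), if_pos h]
        · rw [if_pos (by omega), if_neg h]
      · refine List.map_congr_left ?_
        intro i _
        simp [Function.comp, List.take_succ_cons, List.append_assoc]

-- A's fold over range(j, n), unrolled to emitA
theorem foldA_eq (s : String) (j : Nat) (S : PySem.Set Char) (res : List Int)
    (hres : res.length = s.toList.length) (hj : j ≤ s.toList.length) :
    ((PySem.List.pyRange (j : Int) (s.toList.length : Int) 1).foldl (getStreamStepA s) (S, res)).2
      = res.take j ++ emitA S (s.toList.drop j) := by
  rcases Nat.lt_or_ge j s.toList.length with hlt | hge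
  case inr =>
    rw [PySem.List.pyRange_one_eq_nil (by exact_mod_cast hge)]
    have hd : s.toList.drop j = [] := List.drop_eq_nil_of_le hge
    rw [hd, List.foldl_nil, emitA, List.take_of_length_le (by omega), List.append_nil]
  case inl =>
    have hcons := PySem.List.pyRange_one_cons (a := (j : Int)) (b := (s.toList.length : Int))
      (by exact_mod_cast hlt)
    rw [hcons, List.foldl_cons]
    have hget : PySem.Str.pyGet? s (j : Int) = some (s.toList[j]'hlt) := by
      rw [PySem.Str.pyGet?_natCast]
      exact List.getElem?_eq_getElem hlt
    set c := s.toList[j]'hlt with hc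
    set S' := if ¬ (PySem.Set.contains S c = true) then PySem.Set.add S c
      else (PySem.Set.remove? S c).getD S with hS'
    set v : Int := if PySem.Set.len S' > 1 then (0 : Int) else 1 with hv
    have hstep : getStreamStepA s (S, res) (j : Int) = (S', res.set j v) := by
      simp only [getStreamStepA, hget, hS', hv]
      rw [PySem.List.pySetD_natCast]
    rw [hstep]
    have hlen' : (res.set j v).length = s.toList.length := by simpa using hres
    have hcast : ((j : Int) + 1) = ((j + 1 : Nat) : Int) := by push_cast; ring
    rw [hcast, foldA_eq s (j + 1) S' (res.set j v) hlen' (by omega)]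
    have hdrop : s.toList.drop j = c :: s.toList.drop (j + 1) :=
      List.drop_eq_getElem_cons hlt
    rw [hdrop, emitA]
    have htake : (res.set j v).take (j + 1) = res.take j ++ [v] := by
      have h1 : (res.set j v).take (j + 1)
          = (res.set j v).take j ++ [(res.set j v)[j]'(by omega)] := by
        rw [List.take_add_one, List.getElem?_eq_getElem (by omega)]
        rfl
      rw [h1, List.getElem_set_self (by omega), List.take_set_of_le le_rfl]
    rw [htake, List.append_assoc]
    rfl
termination_by s.toList.length - j
decreasing_by omega

-- ---------- B-side lemmas ----------

theorem length_addAt (d : List Int) (p v : Int) : (addAt d p v).length = d.length :=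
  PySem.List.length_pySetD d p _

theorem pyGetD_addAt (d : List Int) (q j : Nat) (v : Int) (hq : q < d.length) :
    PySem.List.pyGetD (addAt d (q : Int) v) (j : Int) 0
      = if j = q then PySem.List.pyGetD d (j : Int) 0 + v else PySem.List.pyGetD d (j : Int) 0 := by
  unfold addAt
  rw [PySem.List.pyGetD_pySetD_natCast d q j _ 0 hq]
  by_cases h : j = q
  · subst h; simp
  · simp [h]

theorem enumerate_map {α β : Type} (f : α → β) (xs : List α) (st : Int) :
    PySem.List.enumerate (xs.map f) st
      = (PySem.List.enumerate xs st).map (fun p => (p.1, f p.2)) := by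
  induction xs generalizing st with
  | nil => simp [PySem.List.enumerate_nil]
  | cons x t ih => simp [PySem.List.enumerate_cons, ih]

theorem psB_eq (s : String) (c : Char) :
    psB s c = List.map (fun i : Nat => (i : Int)) (posNat s.toList c) := by
  unfold psB posNat
  rw [PySem.Str.len_eq, PySem.List.pyRange_zero_nat, List.filter_map]
  refine congrArg (List.map (fun i : Nat => (i : Int))) ?_
  refine List.filter_congr ?_
  intro i _
  simp [Function.comp, PySem.Str.pyGet?_natCast]

-- the port's inner marking loop IS applyChar
theorem innerB_eq (s : String) (c : Char) (d : List Int) :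
    (PySem.List.pyRange 0 (((psB s c).length : Int)) 1).foldl
      (fun d k =>
        addAt d (PySem.List.pyGetD (psB s c) k 0)
          (if PySem.Int.mod k 2 == 0 then (1 : Int) else -1)) d
    = applyChar s.toList d c := by
  have h1 : (PySem.List.pyRange 0 (((psB s c).length : Int)) 1).foldl
      (fun d k =>
        addAt d (PySem.List.pyGetD (psB s c) k 0)
          (if PySem.Int.mod k 2 == 0 then (1 : Int) else -1)) d
    = (PySem.List.enumerate (psB s c) 0).foldl
        (fun d kp => addAt d kp.2 (if PySem.Int.mod kp.1 2 == 0 then (1 : Int) else -1)) d := by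
    rw [PySem.List.enumerate_eq_map_pyRange (psB s c) 0, List.foldl_map]
    simp [PySem.List.len_eq]
  rw [h1, psB_eq]
  rw [enumerate_map (fun i : Nat => (i : Int)) (posNat s.toList c) 0]
  rw [List.foldl_map]
  rfl

theorem posNat_pairwise (l : List Char) (c : Char) : (posNat l c).Pairwise (· < ·) :=
  List.Pairwise.filter _ List.pairwise_lt_range

theorem mem_posNat (l : List Char) (c : Char) (j : Nat) :
    j ∈ posNat l c ↔ j < l.length ∧ l[j]? = some c := by
  unfold posNat
  rw [List.mem_filter, List.mem_range]
  simp

theorem count_take_eq (l : List Char) (c : Char) :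
    ∀ p, p ≤ l.length →
      (l.take p).count c = ((List.range p).filter (fun i => l[i]? == some c)).length := by
  intro p
  induction p with
  | zero => intro _; simp
  | succ p ih =>
      intro hp
      have hplt : p < l.length := by omega
      rw [List.range_succ, List.filter_append, List.length_append,
        List.take_add_one, List.count_append, ih (by omega)]
      have hget : l[p]? = some (l[p]'hplt) := List.getElem?_eq_getElem hplt
      by_cases h : l[p]'hplt = c
      · simp [hget, h]
      · simp [hget, h, fun hh : c = _ => h hh.symm]

theorem filter_lt_range (q : Nat → Bool) (p n : Nat) (hpn : p ≤ n) :
    (List.range n).filter (fun a => decide (a < p) && q a) = (List.range p).filter q := by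
  obtain ⟨m, rfl⟩ : ∃ m, n = p + m := ⟨n - p, by omega⟩
  rw [List.range_add, List.filter_append]
  have h1 : (List.range p).filter (fun a => decide (a < p) && q a) = (List.range p).filter q := by
    refine List.filter_congr ?_
    intro x hx
    simp [List.mem_range.mp hx]
  have h2 : ((List.range m).map (fun x => p + x)).filter (fun a => decide (a < p) && q a) = [] := by
    rw [List.filter_eq_nil_iff]
    intro a ha
    simp only [List.mem_map, List.mem_range] at ha
    obtain ⟨x, _, rfl⟩ := ha
    simp
  rw [h1, h2, List.append_nil]

theorem filter_lt_getElem_eq_take {xs : List Nat} (hpw : xs.Pairwise (· < ·))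
    (k : Nat) (hk : k < xs.length) {p : Nat} (hkp : xs[k] = p) :
    xs.filter (fun x => decide (x < p)) = xs.take k := by
  have hx := List.pairwise_iff_getElem.mp hpw
  conv_lhs => rw [← List.take_append_drop k xs]
  rw [List.filter_append]
  have h1 : (xs.take k).filter (fun x => decide (x < p)) = xs.take k := by
    rw [List.filter_eq_self]
    intro a ha
    obtain ⟨i, hi, hai⟩ := List.mem_iff_getElem.mp ha
    have hilen : i < k := by
      have := hi; simp only [List.length_take] at this; omega
    have hav : a = xs[i]'(by omega) := by rw [← hai, List.getElem_take]
    rw [hav]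
    simp only [decide_eq_true_eq]
    have := hx i k (by omega) hk hilen
    omega
  have h2 : (xs.drop k).filter (fun x => decide (x < p)) = [] := by
    rw [List.filter_eq_nil_iff]
    intro a ha
    obtain ⟨i, hi, hai⟩ := List.mem_iff_getElem.mp ha
    have hikl : k + i < xs.length := by simp only [List.length_drop] at hi; omega
    have hav : a = xs[k + i]'hikl := by rw [← hai, List.getElem_drop]
    rcases Nat.eq_zero_or_pos i with h0 | h0
    · subst h0
      simp only [Nat.add_zero] at hav
      rw [hav]
      simp only [decide_eq_true_eq]
      omega
    · rw [hav]
      simp only [decide_eq_true_eq]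
      have := hx k (k + i) hk hikl (by omega)
      omega
  rw [h1, h2, List.append_nil]

theorem count_take_posNat (l : List Char) (c : Char) (k : Nat)
    (hk : k < (posNat l c).length) :
    (l.take ((posNat l c)[k])).count c = k := by
  obtain ⟨p, hp⟩ : ∃ p, (posNat l c)[k] = p := ⟨_, rfl⟩
  rw [hp]
  have hmem : p ∈ posNat l c := hp ▸ List.getElem_mem hk
  have hlt : p < l.length := ((mem_posNat l c p).mp hmem).1
  rw [count_take_eq l c p (le_of_lt hlt)]
  have hA : (List.range p).filter (fun i => l[i]? == some c)
      = (posNat l c).filter (fun x => decide (x < p)) := by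
    unfold posNat
    rw [List.filter_filter,
      ← filter_lt_range (fun i => l[i]? == some c) p l.length (le_of_lt hlt)]
  rw [hA, filter_lt_getElem_eq_take (posNat_pairwise l c) k hk hp, List.length_take]
  omega

theorem applyChar_apply (l : List Char) (c : Char) :
    ∀ (qs : List Nat) (k0 : Nat) (d : List Int),
      d.length = l.length + 1 →
      qs.Pairwise (· < ·) →
      (∀ i ∈ qs, i < l.length) →
      (∀ (k : Nat) (h : k < qs.length), (l.take (qs[k])).count c = k0 + k) →
      (((PySem.List.enumerate qs (k0 : Int)).foldl
          (fun d kp => addAt d ((kp.2 : Int))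
            (if PySem.Int.mod kp.1 2 == 0 then (1 : Int) else -1)) d).length = l.length + 1)
      ∧ ∀ j : Nat, j < l.length →
          PySem.List.pyGetD ((PySem.List.enumerate qs (k0 : Int)).foldl
            (fun d kp => addAt d ((kp.2 : Int))
              (if PySem.Int.mod kp.1 2 == 0 then (1 : Int) else -1)) d) (j : Int) 0
          = PySem.List.pyGetD d (j : Int) 0 + (if j ∈ qs then sgnP (l.take j) c else 0) := by
  intro qs
  induction qs with
  | nil =>
      intro k0 d hd _ _ _
      rw [PySem.List.enumerate_nil, List.foldl_nil]
      exact ⟨hd, fun j _ => by simp⟩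
  | cons q qs' ih =>
      intro k0 d hd hpw hb hcount
      have hq_lt : q < l.length := hb q (by simp)
      have hcount0 : (l.take q).count c = k0 := by
        have := hcount 0 (by simp)
        simpa using this
      have hmod : PySem.Int.mod (k0 : Int) 2 = ((k0 % 2 : Nat) : Int) := by
        exact_mod_cast PySem.Int.mod_natCast k0 2
      have hv0 : (if PySem.Int.mod (k0 : Int) 2 == 0 then (1 : Int) else -1)
          = sgnP (l.take q) c := by
        unfold sgnP
        rw [hcount0, hmod]
        by_cases h : k0 % 2 = 0
        · rw [if_pos h, if_pos (by rw [h]; rfl)]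
        · have h2 : ¬ ((((k0 % 2 : Nat) : Int)) == 0) = true := by
            simp only [beq_iff_eq, Int.natCast_eq_zero]
            exact h
          rw [if_neg h, if_neg h2]
      rw [PySem.List.enumerate_cons, List.foldl_cons]
      set d1 := addAt d (q : Int) (if PySem.Int.mod (k0 : Int) 2 == 0 then (1 : Int) else -1)
        with hd1def
      have hd1len : d1.length = l.length + 1 := by rw [hd1def, length_addAt, hd]
      have hcast : (k0 : Int) + 1 = ((k0 + 1 : Nat) : Int) := by push_cast; ring
      have hcount' : ∀ (k : Nat) (h : k < qs'.length),
          (l.take (qs'[k])).count c = (k0 + 1) + k := by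
        intro k h
        have h2 := hcount (k + 1) (by simpa using h)
        rw [List.getElem_cons_succ] at h2
        omega
      have hq_notin : q ∉ qs' := by
        intro hmem
        exact absurd ((List.pairwise_cons.mp hpw).1 q hmem) (lt_irrefl q)
      obtain ⟨ihlen, ihget⟩ := ih (k0 + 1) d1 hd1len (List.pairwise_cons.mp hpw).2
        (fun i hi => hb i (by simp [hi])) hcount'
      rw [hcast]
      refine ⟨ihlen, ?_⟩
      intro j hj
      rw [ihget j hj]
      have hgd1 : PySem.List.pyGetD d1 (j : Int) 0
          = if j = q then PySem.List.pyGetD d (j : Int) 0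
              + (if PySem.Int.mod (k0 : Int) 2 == 0 then (1 : Int) else -1)
            else PySem.List.pyGetD d (j : Int) 0 := by
        rw [hd1def]
        exact pyGetD_addAt d q j _ (by omega)
      by_cases hjq : j = q
      · subst hjq
        rw [hgd1, if_pos rfl, hv0, if_neg hq_notin,
          if_pos (show j ∈ j :: qs' from List.mem_cons_self ..)]
        ring
      · rw [hgd1, if_neg hjq]
        have : (j ∈ q :: qs') ↔ (j ∈ qs') := by simp [hjq]
        by_cases hjm : j ∈ qs'
        · rw [if_pos hjm, if_pos (this.mpr hjm)]
        · rw [if_neg hjm, if_neg (fun hh => hjm (this.mp hh))]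

theorem applyChar_spec (s : String) (c : Char) (d : List Int)
    (hd : d.length = s.toList.length + 1) :
    ((applyChar s.toList d c).length = s.toList.length + 1)
    ∧ ∀ (j : Nat) (hj : j < s.toList.length),
        PySem.List.pyGetD (applyChar s.toList d c) (j : Int) 0
          = PySem.List.pyGetD d (j : Int) 0
            + (if s.toList[j]'hj = c then sgnP (s.toList.take j) c else 0) := by
  set l := s.toList
  have h := applyChar_apply l c (posNat l c) 0 d hd (posNat_pairwise l c)
    (fun i hi => ((mem_posNat l c i).mp hi).1)
    (fun k hk => by simpa using count_take_posNat l c k hk)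
  unfold applyChar
  rw [show ((0 : Nat) : Int) = (0 : Int) by simp] at h
  refine ⟨h.1, ?_⟩
  intro j hj
  rw [h.2 j hj]
  have hmem : j ∈ posNat l c ↔ l[j]'hj = c := by
    rw [mem_posNat]
    simp [List.getElem?_eq_getElem hj, hj]
  by_cases hc : l[j]'hj = c
  · rw [if_pos (hmem.mpr hc), if_pos hc]
  · rw [if_neg (fun hh => hc (hmem.mp hh)), if_neg hc]

theorem charsFold_spec (s : String) :
    ∀ (cs : List Char) (d : List Int), cs.Nodup → d.length = s.toList.length + 1 →
      ((cs.foldl (applyChar s.toList) d).length = s.toList.length + 1)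
      ∧ ∀ (j : Nat) (hj : j < s.toList.length),
          PySem.List.pyGetD (cs.foldl (applyChar s.toList) d) (j : Int) 0
            = PySem.List.pyGetD d (j : Int) 0
              + (if s.toList[j]'hj ∈ cs then sgnP (s.toList.take j) (s.toList[j]'hj) else 0) := by
  intro cs
  induction cs with
  | nil =>
      intro d _ hd
      exact ⟨hd, fun j hj => by simp⟩
  | cons c cs' ih =>
      intro d hnd hd
      obtain ⟨hc_notin, hnd'⟩ := List.nodup_cons.mp hnd
      obtain ⟨h1len, h1get⟩ := applyChar_spec s c d hd
      obtain ⟨ihlen, ihget⟩ := ih (applyChar s.toList d c) hnd' h1len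
      rw [List.foldl_cons]
      refine ⟨ihlen, ?_⟩
      intro j hj
      rw [ihget j hj, h1get j hj]
      by_cases hjc : s.toList[j]'hj = c
      · rw [if_pos hjc, if_neg (by rw [hjc]; exact hc_notin), if_pos (by simp [hjc]), hjc]
        ring
      · rw [if_neg hjc]
        by_cases hjm : s.toList[j]'hj ∈ cs'
        · rw [if_pos hjm, if_pos (by simp [hjm])]
          ring
        · rw [if_neg hjm, if_neg (by simp [hjc, hjm])]
          ring

theorem deltaB_spec (s : String) :
    ((deltaB s).length = s.toList.length + 1)
    ∧ ∀ (j : Nat) (hj : j < s.toList.length),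
        PySem.List.pyGetD (deltaB s) (j : Int) 0 = sgnP (s.toList.take j) (s.toList[j]'hj) := by
  have hbody : (fun (d : List Int) (c : Char) =>
      (PySem.List.pyRange 0 (((psB s c).length : Int)) 1).foldl
        (fun d k =>
          addAt d (PySem.List.pyGetD (psB s c) k 0)
            (if PySem.Int.mod k 2 == 0 then (1 : Int) else -1)) d)
      = applyChar s.toList := by
    funext d c
    exact innerB_eq s c d
  have hdelta : deltaB s = (PySem.List.sorted (PySem.Set.ofList s.toList) (fun x => x)).foldl
      (applyChar s.toList) (List.replicate (s.toList.length + 1) (0 : Int)) := by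
    unfold deltaB
    rw [hbody]
  set cs := PySem.List.sorted (PySem.Set.ofList s.toList) (fun x => x) with hcs
  have hnd : cs.Nodup :=
    (PySem.List.sorted_ofList_pairwise_lt s.toList).imp (fun h => ne_of_lt h)
  have h0 : (List.replicate (s.toList.length + 1) (0 : Int)).length = s.toList.length + 1 := by
    simp
  obtain ⟨hlen, hget⟩ := charsFold_spec s cs (List.replicate (s.toList.length + 1) (0 : Int))
    hnd h0
  rw [hdelta]
  refine ⟨hlen, ?_⟩
  intro j hj
  rw [hget j hj]
  have hmem : s.toList[j]'hj ∈ cs := by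
    rw [hcs, PySem.List.mem_sorted, PySem.Set.mem_ofList]
    exact List.getElem_mem hj
  have hrep : PySem.List.pyGetD (List.replicate (s.toList.length + 1) (0 : Int)) (j : Int) 0
      = 0 := by
    rw [PySem.List.pyGetD_natCast]
    exact List.getD_replicate 0 (by omega)
  rw [hrep, if_pos hmem]
  ring

-- parity-count bookkeeping for the prefix sums
theorem filter_length_flip {u : List Char} (hu : u.Nodup) {c : Char} (hc : c ∈ u)
    (p p' : Char → Bool) (h : ∀ x, x ≠ c → p' x = p x) :
    ((u.filter p').length : Int)
      = (u.filter p).length + (if p' c then 1 else 0) - (if p c then 1 else 0) := by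
  induction u with
  | nil => simp at hc
  | cons a u' ih =>
      obtain ⟨ha_notin, hnd'⟩ := List.nodup_cons.mp hu
      rcases List.mem_cons.mp hc with hac | hcu'
      · subst hac
        have hsame : u'.filter p' = u'.filter p := by
          refine List.filter_congr ?_
          intro x hx
          exact h x (fun hxc => ha_notin (hxc ▸ hx))
        by_cases hp' : p' c <;> by_cases hp : p c <;>
          simp [List.filter_cons, hp', hp, hsame] <;> push_cast <;> ring
      · have hac : a ≠ c := fun hh => ha_notin (hh ▸ hcu')
        have hpa : p' a = p a := h a hac
        have := ih hnd' hcu'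
        by_cases hp : p a <;>
          simp [List.filter_cons, hpa, hp, this] <;> push_cast <;> ring

theorem oddU_append (u t : List Char) (c : Char) (hu : u.Nodup) (hc : c ∈ u) :
    oddU u (t ++ [c]) = oddU u t + sgnP t c := by
  unfold oddU sgnP
  have hagree : ∀ x, x ≠ c → (fun x => (t ++ [c]).count x % 2 == 1) x
      = (fun x => t.count x % 2 == 1) x := by
    intro x hx
    simp only [count_append_singleton, if_neg hx, Nat.add_zero]
  rw [filter_length_flip hu hc _ _ hagree]
  have hcc : (t ++ [c]).count c = t.count c + 1 := by
    rw [count_append_singleton, if_pos rfl]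
  by_cases hpar : t.count c % 2 = 0
  · have h1 : ¬ ((t.count c % 2 == 1) = true) := by simp; omega
    have h2 : (((t ++ [c]).count c % 2 == 1) = true) := by rw [hcc]; simp; omega
    rw [if_pos h2, if_neg h1, if_pos hpar]
    ring
  · have h1 : ((t.count c % 2 == 1) = true) := by simp; omega
    have h2 : ¬ (((t ++ [c]).count c % 2 == 1) = true) := by rw [hcc]; simp; omega
    rw [if_neg h2, if_pos h1, if_neg hpar]
    ring

theorem oddU_nil (u : List Char) : oddU u [] = 0 := by
  unfold oddU
  simp

-- B's prefix-sum loop, unrolled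
theorem stageC (s : String) (dlt : List Int)
    (hdl : ∀ (j : Nat) (hj : j < s.toList.length),
      PySem.List.pyGetD dlt (j : Int) 0 = sgnP (s.toList.take j) (s.toList[j]'hj)) :
    ∀ (m a : Nat), s.toList.length - a ≤ m → a ≤ s.toList.length →
      ∀ (odd : Int) (acc : List Int),
      odd = oddU (PySem.List.dedup s.toList) (s.toList.take a) →
      ((PySem.List.pyRange (a : Int) ((s.toList.length : Nat) : Int) 1).foldl
          (fun st i =>
            let odd := st.1 + PySem.List.pyGetD dlt i 0
            (odd, st.2 ++ [if odd ≤ 1 then (1 : Int) else 0]))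
          (odd, acc)).2
      = acc ++ (List.range (s.toList.length - a)).map
          (fun i => if oddU (PySem.List.dedup s.toList) (s.toList.take (a + 1 + i)) ≤ 1
            then (1 : Int) else 0) := by
  intro m
  induction m with
  | zero =>
      intro a hm ha odd acc hodd
      have hge : s.toList.length ≤ a := by omega
      rw [PySem.List.pyRange_one_eq_nil (by exact_mod_cast hge), List.foldl_nil]
      have h0 : s.toList.length - a = 0 := by omega
      rw [h0]
      simp
  | succ m' ih =>
      intro a hm ha odd acc hodd
      rcases Nat.lt_or_ge a s.toList.length with hlt | hge
      case inr =>
        rw [PySem.List.pyRange_one_eq_nil (by exact_mod_cast hge), List.foldl_nil]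
        have h0 : s.toList.length - a = 0 := by omega
        rw [h0]
        simp
      case inl =>
        rw [PySem.List.pyRange_one_cons (by exact_mod_cast hlt), List.foldl_cons]
        set u := PySem.List.dedup s.toList with hu
        have hodd' : odd + PySem.List.pyGetD dlt (a : Int) 0
            = oddU u (s.toList.take (a + 1)) := by
          rw [hodd, hdl a hlt]
          have htake : s.toList.take (a + 1) = s.toList.take a ++ [s.toList[a]'hlt] := by
            rw [List.take_add_one, List.getElem?_eq_getElem hlt]
            rfl
          rw [htake, oddU_append u _ _ (PySem.List.nodup_dedup s.toList)
            (by rw [hu, PySem.List.mem_dedup]; exact List.getElem_mem hlt)]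
        have hcast : ((a : Int) + 1) = ((a + 1 : Nat) : Int) := by push_cast; ring
        rw [hcast]
        have hrec := ih (a + 1) (by omega) (by omega)
          (odd + PySem.List.pyGetD dlt (a : Int) 0)
          (acc ++ [if odd + PySem.List.pyGetD dlt (a : Int) 0 ≤ 1 then (1 : Int) else 0]) hodd'
        rw [hrec]
        have hn : s.toList.length - a = (s.toList.length - (a + 1)) + 1 := by omega
        rw [hn, List.range_succ_eq_map, List.map_cons, List.map_map, List.append_assoc]
        congr 1
        rw [List.singleton_append]
        congr 1
        · simp only [Nat.add_zero]
          rw [← hodd']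
        · refine List.map_congr_left ?_
          intro i _
          have h3 : a + 1 + 1 + i = a + 1 + (i + 1) := by omega
          simp [Function.comp, h3]

-- ===== VERDICT (by name: the statement is the Claim_ definition above) =====
theorem getStream_spec : Claim_equal_getStream := by
  intro s _
  unfold Spec_getStream
  set u := PySem.List.dedup s.toList with hu
  have hu_nodup : u.Nodup := PySem.List.nodup_dedup s.toList
  -- A's value
  have hA : getStream s = (List.range s.toList.length).map
      (fun i => if oddU u (s.toList.take (i + 1)) ≤ 1 then (1 : Int) else 0) := by
    unfold getStream
    rw [PySem.Str.len_eq]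
    have h0 := foldA_eq s 0 PySem.Set.empty (List.replicate s.toList.length (0 : Int))
      (by simp) (Nat.zero_le _)
    simp only [Int.natCast_zero] at h0
    rw [h0, List.take_zero, List.drop_zero, List.nil_append]
    have hmem0 : ∀ c, c ∈ (PySem.Set.empty : PySem.Set Char) ↔ ([] : List Char).count c % 2 = 1 := by
      intro c
      show c ∈ ([] : List Char) ↔ _
      simp
    rw [emitA_spec u hu_nodup s.toList [] PySem.Set.empty List.nodup_nil hmem0
      (by intro c hc; rw [hu, PySem.List.mem_dedup]; simpa using hc)]
    simp
  -- B's value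
  have hB : getStream_alt s = (List.range s.toList.length).map
      (fun i => if oddU u (s.toList.take (i + 1)) ≤ 1 then (1 : Int) else 0) := by
    unfold getStream_alt
    rw [PySem.Str.len_eq]
    obtain ⟨_, hget⟩ := deltaB_spec s
    have h0 := stageC s (deltaB s) hget s.toList.length 0 (by omega) (Nat.zero_le _) 0 []
      (by rw [List.take_zero, oddU_nil])
    simp only [Int.natCast_zero] at h0
    rw [h0, Nat.sub_zero, List.nil_append]
    refine List.map_congr_left ?_
    intro i _
    have : 0 + 1 + i = i + 1 := by omega
    rw [this]
  rw [hA, hB]
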